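-- pv_equiv track=rewrite | github.com/traceopt-ai/traceml | src/traceml/renderers/step_memory/common.py | _common_suffix_steps_fast
-- ===== SOURCE A (Python) =====
-- from typing import Dict, List, Optional, Sequence, Tuple
--
-- def _common_suffix_steps_fast(
--     per_rank_steps: Dict[int, Dict[int, float]],
--     completed_step: int,
--     window_size: int,
-- ) -> List[int]:
--     """
--     Return last `window_size` common steps across all ranks, up to completed_step.
--     """
--     maps = list(per_rank_steps.values())
--     if not maps or window_size <= 0 or completed_step < 0:
--         return []
--
--     reference = maps[0]
--     out_rev: List[int] = []
--
--     step = int(completed_step)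
--     scan_cap = max(window_size * 20, window_size + 1)
--     scanned = 0
--
--     while step >= 0 and len(out_rev) < window_size:
--         scanned += 1
--         if scanned > scan_cap:
--             break
--
--         if step in reference:
--             ok = True
--             for m in maps[1:]:
--                 if step not in m:
--                     ok = False
--                     break
--             if ok:
--                 out_rev.append(step)
--
--         step -= 1
--
--     if not out_rev:
--         return []
--     out_rev.reverse()
--     return out_rev
-- ===== SOURCE B (Python) =====
-- from typing import Dict, List
--
--
-- def _common_suffix_steps_fast(
--     per_rank_steps: Dict[int, Dict[int, float]],
--     completed_step: int,
--     window_size: int,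
-- ) -> List[int]:
--     """
--     Return last `window_size` common steps across all ranks, up to completed_step.
--     """
--     maps = list(per_rank_steps.values())
--     if not maps or window_size <= 0 or completed_step < 0:
--         return []
--
--     common = set(maps[0])
--     for m in maps[1:]:
--         common &= m.keys()
--
--     cs = int(completed_step)
--     scan_cap = max(window_size * 20, window_size + 1)
--     lo = max(0, cs - scan_cap + 1)
--
--     hits = sorted(s for s in common if lo <= s <= cs)
--     return hits[-window_size:]
-- ===== Notes on version B (the rewrite author's own statement) =====
-- stated objective: simpler
-- what changed: Replaces A's stateful downward while-loop (per-step membership probes of every rank's map with a scanned counter and early break) by a key-set intersection over all ranks, then a range filter [max(0, cs-scan_cap+1), cs], sort, and tail slice of the last window_size entries.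
import Mathlib
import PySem

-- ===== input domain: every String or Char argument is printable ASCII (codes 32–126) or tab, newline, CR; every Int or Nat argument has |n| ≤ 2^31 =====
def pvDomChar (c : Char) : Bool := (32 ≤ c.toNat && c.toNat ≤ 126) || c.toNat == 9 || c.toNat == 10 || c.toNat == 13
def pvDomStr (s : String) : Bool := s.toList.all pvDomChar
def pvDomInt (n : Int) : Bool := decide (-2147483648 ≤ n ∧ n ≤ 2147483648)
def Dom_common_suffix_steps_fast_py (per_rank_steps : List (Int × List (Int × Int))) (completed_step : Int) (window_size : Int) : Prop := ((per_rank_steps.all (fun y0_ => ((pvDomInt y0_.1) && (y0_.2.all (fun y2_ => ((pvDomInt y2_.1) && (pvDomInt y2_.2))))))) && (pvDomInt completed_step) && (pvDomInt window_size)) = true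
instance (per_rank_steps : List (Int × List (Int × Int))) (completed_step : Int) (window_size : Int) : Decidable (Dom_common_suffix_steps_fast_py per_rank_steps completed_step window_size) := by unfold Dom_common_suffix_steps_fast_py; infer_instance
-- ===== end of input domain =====

-- B replaces A's downward membership-scanning loop by a key-set intersection followed by
-- filter / sort / tail-slice; same return value everywhere (objective: simpler).

-- ===== PORT A =====
-- 'step in m' for a Python dict rendered as an association list (key membership)
def pvKeyMem (m : List (Int × Int)) (s : Int) : Bool := m.any (fun p => p.1 == s)

-- the while loop of A: state (step, scanned, out_rev)
def pvALoop (maps : List (List (Int × Int))) (reference : List (Int × Int))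
    (window_size scan_cap : Int) (step scanned : Int) (out_rev : List Int) : List Int :=
  if 0 ≤ step ∧ (out_rev.length : Int) < window_size then
    if h : scanned + 1 > scan_cap then out_rev
    else
      pvALoop maps reference window_size scan_cap (step - 1) (scanned + 1)
        (if pvKeyMem reference step then
           -- 'for m in maps[1:]: if step not in m: ok = False; break' — ok ↔ all of maps[1:] contain step
           if (maps.drop 1).all (fun m => pvKeyMem m step) then out_rev ++ [step] else out_rev
         else out_rev)
  else out_rev
termination_by (scan_cap - scanned).toNat
decreasing_by omega

def common_suffix_steps_fast_py (per_rank_steps : List (Int × List (Int × Int))) (completed_step : Int) (window_size : Int) : List Int :=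
  let maps := per_rank_steps.map (·.2)
  if maps = [] ∨ window_size ≤ 0 ∨ completed_step < 0 then []
  else
    let reference := maps.headD []
    let scan_cap := max (window_size * 20) (window_size + 1)
    let out_rev := pvALoop maps reference window_size scan_cap completed_step 0 []
    if out_rev = [] then [] else out_rev.reverse

-- ===== PORT B =====
def common_suffix_steps_fast_py_alt (per_rank_steps : List (Int × List (Int × Int))) (completed_step : Int) (window_size : Int) : List Int :=
  let maps := per_rank_steps.map (·.2)
  if maps = [] ∨ window_size ≤ 0 ∨ completed_step < 0 then []
  else
    -- common = set(maps[0]); for m in maps[1:]: common &= m.keys()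
    let common : PySem.Set Int :=
      (maps.drop 1).foldl (fun c m => PySem.Set.inter c (m.map (·.1)))
        (PySem.Set.ofList ((maps.headD []).map (·.1)))
    let scan_cap := max (window_size * 20) (window_size + 1)
    let lo := max 0 (completed_step - scan_cap + 1)
    -- hits = sorted(s for s in common if lo <= s <= cs)
    let hits := PySem.List.sorted
      (common.filter (fun s => decide (lo ≤ s) && decide (s ≤ completed_step))) (fun x => x) false
    -- hits[-window_size:]
    PySem.List.slice hits (some (-window_size)) none

-- ===== PRECONDITION & SPEC =====
def Spec_common_suffix_steps_fast_py (per_rank_steps : List (Int × List (Int × Int))) (completed_step : Int) (window_size : Int) (out : List Int) : Prop := out = common_suffix_steps_fast_py_alt per_rank_steps completed_step window_size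
instance (per_rank_steps : List (Int × List (Int × Int))) (completed_step : Int) (window_size : Int) (out : List Int) : Decidable (Spec_common_suffix_steps_fast_py per_rank_steps completed_step window_size out) := by unfold Spec_common_suffix_steps_fast_py; infer_instance

-- ===== CLAIM (what is proved, stated in full; the proofs are below) =====
def Claim_equal_common_suffix_steps_fast_py : Prop := ∀ (per_rank_steps : List (Int × List (Int × Int))) (completed_step : Int) (window_size : Int), Dom_common_suffix_steps_fast_py per_rank_steps completed_step window_size → Spec_common_suffix_steps_fast_py per_rank_steps completed_step window_size (common_suffix_steps_fast_py per_rank_steps completed_step window_size)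

-- ===== LEMMAS AND PROOFS =====

-- 'step is in every rank's map'
def pvAllMem (maps : List (List (Int × Int))) (s : Int) : Bool := maps.all (fun m => pvKeyMem m s)

-- A's loop with the cap and the capacity made into explicit fuel: collected steps, in scan order
def pvG (maps : List (List (Int × Int))) : Nat → Nat → Int → List Int
  | 0, _, _ => []
  | _ + 1, 0, _ => []
  | r + 1, k + 1, step =>
    if step < 0 then []
    else if pvAllMem maps step then step :: pvG maps r k (step - 1)
    else pvG maps r (k + 1) (step - 1)

-- the same scan without the capacity bound
def pvD (maps : List (List (Int × Int))) : Nat → Int → List Int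
  | 0, _ => []
  | r + 1, step =>
    if step < 0 then []
    else if pvAllMem maps step then step :: pvD maps r (step - 1)
    else pvD maps r (step - 1)

lemma pvG_eq_nil_of_neg (maps : List (List (Int × Int))) (r k : Nat) (step : Int)
    (h : step < 0) : pvG maps r k step = [] := by
  cases r <;> cases k <;> simp [pvG, h]

lemma pvG_zero_cap (maps : List (List (Int × Int))) (k : Nat) (step : Int) :
    pvG maps 0 k step = [] := by cases k <;> simp [pvG]

lemma pvG_zero_k (maps : List (List (Int × Int))) (r : Nat) (step : Int) :
    pvG maps r 0 step = [] := by cases r <;> simp [pvG]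

lemma pvALoop_eq (ref : List (Int × Int)) (rest : List (List (Int × Int))) (ws cap : Int) :
    ∀ (r : Nat) (step scanned : Int) (out : List Int), r = (cap - scanned).toNat →
    pvALoop (ref :: rest) ref ws cap step scanned out
      = out ++ pvG (ref :: rest) r (ws - out.length).toNat step := by
  intro r
  induction r with
  | zero =>
    intro step scanned out hr
    rw [pvALoop, pvG_zero_cap]
    have hcap : scanned + 1 > cap := by omega
    rw [List.append_nil]
    by_cases h1 : 0 ≤ step ∧ (out.length : Int) < ws
    · rw [if_pos h1, dif_pos hcap]
    · rw [if_neg h1]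
  | succ r ih =>
    intro step scanned out hr
    rw [pvALoop]
    by_cases h1 : 0 ≤ step ∧ (out.length : Int) < ws
    · obtain ⟨k', hk'⟩ : ∃ k', (ws - (out.length : Int)).toNat = k' + 1 :=
        ⟨(ws - (out.length : Int)).toNat - 1, by omega⟩
      have h2 : ¬ scanned + 1 > cap := by omega
      rw [if_pos h1, dif_neg h2]
      rw [ih (step - 1) (scanned + 1) _ (by omega)]
      rw [hk']
      have hstep : ¬ step < 0 := by omega
      by_cases hm : pvAllMem (ref :: rest) step = true
      · have href : pvKeyMem ref step = true := by
          simp [pvAllMem, List.all_cons] at hm; exact hm.1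
        have hrest : rest.all (fun m => pvKeyMem m step) = true := by
          simp [pvAllMem, List.all_cons] at hm
          simp [List.all_eq_true]; exact hm.2
        simp only [List.drop_one, List.tail_cons, href, hrest, if_true]
        have : (ws - ((out ++ [step]).length : Int)).toNat = k' := by
          simp only [List.length_append, List.length_cons, List.length_nil]
          push_cast; omega
        rw [this, pvG, if_neg hstep, if_pos hm]
        simp
      · have hout' : (if pvKeyMem ref step = true then
            if rest.all (fun m => pvKeyMem m step) = true then out ++ [step] else out
          else out) = out := by
          simp [pvAllMem, List.all_cons] at hm
          by_cases href : pvKeyMem ref step = true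
          · have : ¬ rest.all (fun m => pvKeyMem m step) = true := by
              simp [List.all_eq_true]
              obtain ⟨m, hm1, hm2⟩ := hm href
              exact ⟨m, hm1, by simpa using hm2⟩
            simp [href, this]
          · simp [href]
        simp only [List.drop_one, List.tail_cons] at hout' ⊢
        rw [hout', hk', pvG, if_neg hstep, if_neg hm]
    · rw [if_neg h1]
      by_cases hstep : step < 0
      · rw [pvG_eq_nil_of_neg _ _ _ _ hstep]; simp
      · have : (ws - (out.length : Int)).toNat = 0 := by omega
        rw [this, pvG_zero_k]; simp

lemma pvG_eq_take (maps : List (List (Int × Int))) :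
    ∀ (r k : Nat) (step : Int), pvG maps r k step = (pvD maps r step).take k := by
  intro r
  induction r with
  | zero => intro k step; simp [pvG_zero_cap, pvD]
  | succ r ih =>
    intro k step
    cases k with
    | zero => simp [pvG_zero_k]
    | succ k =>
      by_cases hstep : step < 0
      · simp [pvG, pvD, hstep]
      · by_cases hm : pvAllMem maps step = true
        · simp [pvG, pvD, hstep, hm, ih]
        · simp [pvG, pvD, hstep, hm, ih]

lemma pvD_eq_reverse_filter (maps : List (List (Int × Int))) :
    ∀ (r : Nat) (step : Int),
    pvD maps r step
      = ((PySem.List.pyRange (max 0 (step - r + 1)) (step + 1) 1).filter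
          (fun s => pvAllMem maps s)).reverse := by
  intro r
  induction r with
  | zero =>
    intro step
    rw [PySem.List.pyRange_one_eq_nil (by omega)]
    simp [pvD]
  | succ r ih =>
    intro step
    by_cases hstep : step < 0
    · rw [PySem.List.pyRange_one_eq_nil (by omega)]
      simp [pvD, hstep]
    · have hlo : max 0 (step - ((r : Nat) + 1 : Int) + 1) ≤ step := by omega
      have hcast : ((r + 1 : Nat) : Int) = (r : Nat) + 1 := by push_cast; ring
      rw [pvD, if_neg hstep, hcast,
        PySem.List.pyRange_one_append _ step _ hlo (by omega),
        PySem.List.pyRange_one_singleton, List.filter_append, List.reverse_append,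
        List.filter_singleton]
      rw [ih (step - 1),
        show step - 1 - (r : Int) + 1 = step - ((r : Nat) + 1 : Int) + 1 from by ring,
        show step - 1 + 1 = step from by ring]
      by_cases hm : pvAllMem maps step = true
      · simp [hm]
      · simp [hm]
lemma pvKeyMem_iff_mem_keys (m : List (Int × Int)) (x : Int) :
    pvKeyMem m x = true ↔ x ∈ m.map (·.1) := by
  unfold pvKeyMem
  rw [List.any_eq_true]
  constructor
  · rintro ⟨p, hp, he⟩
    exact List.mem_map.mpr ⟨p, hp, beq_iff_eq.mp he⟩
  · intro h
    obtain ⟨p, hp, he⟩ := List.mem_map.mp h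
    exact ⟨p, hp, beq_iff_eq.mpr he⟩

lemma pvFoldlInter_nodup (rest : List (List (Int × Int))) :
    ∀ (c : List Int), c.Nodup →
    (rest.foldl (fun c m => PySem.Set.inter c (m.map (·.1))) c).Nodup := by
  induction rest with
  | nil => intro c hc; simpa using hc
  | cons m rest ih =>
    intro c hc
    simp only [List.foldl_cons]
    exact ih _ (by unfold PySem.Set.inter; exact List.Nodup.filter _ hc)

lemma pvFoldlInter_mem (rest : List (List (Int × Int))) :
    ∀ (c : List Int) (x : Int),
    (x ∈ rest.foldl (fun c m => PySem.Set.inter c (m.map (·.1))) c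
      ↔ x ∈ c ∧ ∀ m ∈ rest, pvKeyMem m x = true) := by
  induction rest with
  | nil => intro c x; simp
  | cons m rest ih =>
    intro c x
    simp only [List.foldl_cons, ih, PySem.Set.mem_inter, List.mem_cons]
    rw [← pvKeyMem_iff_mem_keys]
    constructor
    · rintro ⟨⟨h1, h2⟩, h3⟩
      exact ⟨h1, fun m' hm' => by rcases hm' with rfl | hm' <;> [exact h2; exact h3 m' hm']⟩
    · rintro ⟨h1, h2⟩
      exact ⟨⟨h1, h2 m (Or.inl rfl)⟩, fun m' hm' => h2 m' (Or.inr hm')⟩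

-- B's sorted/filtered common list equals the ascending filtered range A effectively scans
lemma pvHits_eq_asc (ref : List (Int × Int)) (rest : List (List (Int × Int)))
    (lo cs : Int) (hlo : 0 ≤ lo) :
    PySem.List.sorted
      (((rest.foldl (fun c m => PySem.Set.inter c (m.map (·.1)))
          (PySem.Set.ofList (ref.map (·.1)))).filter
        (fun s => decide (lo ≤ s) && decide (s ≤ cs)))) (fun x => x) false
    = (PySem.List.pyRange lo (cs + 1) 1).filter (fun s => pvAllMem (ref :: rest) s) := by
  apply PySem.List.sorted_eq_of_perm_of_pairwise_lt
  · apply (List.perm_ext_iff_of_nodup _ _).mpr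
    · intro x
      simp only [List.mem_filter, PySem.List.mem_pyRange_one, pvFoldlInter_mem,
        PySem.Set.mem_ofList, ← pvKeyMem_iff_mem_keys, pvAllMem, List.all_cons,
        List.all_eq_true, Bool.and_eq_true, decide_eq_true_eq]
      rw [Int.lt_add_one_iff]
      tauto
    · exact List.Nodup.filter _ (PySem.List.nodup_pyRange_one _ _)
    · exact List.Nodup.filter _
        (pvFoldlInter_nodup _ _ (PySem.Set.nodup_ofList _))
  · exact List.Pairwise.filter _ (PySem.List.pairwise_lt_pyRange_one _ _)

-- ===== VERDICT (by name: the statement is the Claim_ definition above) =====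
theorem common_suffix_steps_fast_py_spec : Claim_equal_common_suffix_steps_fast_py := by
  intro prs cs ws _
  unfold Spec_common_suffix_steps_fast_py
  unfold common_suffix_steps_fast_py common_suffix_steps_fast_py_alt
  dsimp only
  by_cases hguard : prs.map (·.2) = [] ∨ ws ≤ 0 ∨ cs < 0
  · rw [if_pos hguard, if_pos hguard]
  · rw [if_neg hguard, if_neg hguard]
    push_neg at hguard
    obtain ⟨hne, hws, hcs⟩ := hguard
    obtain ⟨ref, rest, hm⟩ := List.exists_cons_of_ne_nil hne
    rw [hm]
    set cap := max (ws * 20) (ws + 1) with hcap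
    have hcap2 : 2 ≤ cap := by
      have := le_max_right (ws * 20) (ws + 1); omega
    set lo := max 0 (cs - cap + 1) with hlo
    -- evaluate A's loop
    rw [List.headD_cons,
      pvALoop_eq ref rest ws cap (cap - 0).toNat cs 0 [] rfl,
      pvG_eq_take, pvD_eq_reverse_filter]
    have hloeq : max 0 (cs - ((cap - 0).toNat : Int) + 1) = lo := by
      rw [hlo]; omega
    rw [hloeq]
    set asc := (PySem.List.pyRange lo (cs + 1) 1).filter
      (fun s => pvAllMem (ref :: rest) s) with hasc
    -- evaluate B
    rw [List.drop_one, List.tail_cons,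
      pvHits_eq_asc ref rest lo cs (le_max_left _ _), ← hasc,
      PySem.List.slice_some_none]
    rw [← Int.toNat_of_nonneg (show (0:Int) ≤ ws from by omega)]
    rw [PySem.List.clampIdx_neg_natCast _ _ (show 0 < ws.toNat from by omega)]
    simp only [List.nil_append, List.length_nil, Nat.cast_zero, Int.natCast_zero, sub_zero,
      Int.toNat_natCast]
    have h1 : (asc.reverse.take ws.toNat).reverse = asc.drop (asc.length - ws.toNat) := by
      rw [List.take_reverse, List.reverse_reverse]
    split_ifs with h
    · rw [← h1, h, List.reverse_nil]
    · exact h1
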